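-- pv_equiv track=rewrite | github.com/BigFedor/Tasks | Dynamic programming/Exercise_2.py | grasshopper
-- ===== SOURCE A (Python) =====
-- def grasshopper(n):
-- 	G = [-1] * (n + 1)
-- 	G[0] = 0
-- 	G[1] = 1
-- 	G[2] = 1
-- 	for i in range(3, n + 1):
-- 		G[i] = G[i - 1] + G[i - 2]
-- 		if i % 3 == 0:
-- 			G[i] += G[int(i / 3)]
-- 	return G[n]
-- ===== SOURCE B (Python) =====
-- def grasshopper(n):
--     # forward/push DP: each finalized G[j] is added into its dependents j+1, j+2, 3*j
--     G = [-1] * (n + 1)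
--     G[0] = 0
--     G[1] = 1
--     G[2] = 1
--     for i in range(3, n + 1):
--         G[i] = 0
--     for j in range(0, n + 1):
--         v = G[j]
--         if 3 <= j + 1 <= n:
--             G[j + 1] += v
--         if 3 <= j + 2 <= n:
--             G[j + 2] += v
--         if j >= 1 and 3 * j <= n:
--             G[3 * j] += v
--     return G[n]
-- ===== Notes on version B (the rewrite author's own statement) =====
-- stated objective: alternative
-- what changed: Replaced A's backward pull recurrence (each G[i] reads G[i-1], G[i-2], G[i//3]) by a forward push DP: the table is zero-initialized above the base cases and each finalized G[j] is added into its dependents G[j+1], G[j+2] and G[3*j].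
import Mathlib
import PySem

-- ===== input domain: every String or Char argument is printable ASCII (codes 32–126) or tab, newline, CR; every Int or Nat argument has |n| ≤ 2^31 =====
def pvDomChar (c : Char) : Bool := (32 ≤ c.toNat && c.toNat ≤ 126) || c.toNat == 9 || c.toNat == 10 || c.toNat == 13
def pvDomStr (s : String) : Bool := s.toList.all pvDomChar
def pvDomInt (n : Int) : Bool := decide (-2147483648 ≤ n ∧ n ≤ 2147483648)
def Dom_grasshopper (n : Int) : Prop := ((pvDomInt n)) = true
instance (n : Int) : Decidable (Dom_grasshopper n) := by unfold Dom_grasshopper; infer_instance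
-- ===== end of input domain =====

-- B replaces A's backward (pull) recurrence by a forward (push) DP that adds each
-- finalized table entry into its dependents; objective: alternative decomposition, same O(n) cost.

-- ===== PORT A =====
-- Literal port of A. pySetD/pyGetD are the total forms of Python's G[i]=… / G[i];
-- under Pre_grasshopper (n ≥ 2) every index is in range, exactly where Python returns.
-- int(i/3) is PySem.Int.truncdiv i 3, exact on |i| ≤ 2^31 < 2^53.
def grasshopper (n : Int) : Int :=
  let G0 := List.replicate (n + 1).toNat (-1 : Int)
  let G1 := PySem.List.pySetD G0 0 0
  let G2 := PySem.List.pySetD G1 1 1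
  let G3 := PySem.List.pySetD G2 2 1
  let G4 := (PySem.List.pyRange 3 (n + 1) 1).foldl (fun G i =>
      let G' := PySem.List.pySetD G i
        (PySem.List.pyGetD G (i - 1) 0 + PySem.List.pyGetD G (i - 2) 0)
      if PySem.Int.mod i 3 = 0 then
        PySem.List.pySetD G' i
          (PySem.List.pyGetD G' i 0 + PySem.List.pyGetD G' (PySem.Int.truncdiv i 3) 0)
      else G') G3
  PySem.List.pyGetD G4 n 0

-- ===== PORT B =====
-- Literal port of Source B (forward/push DP).
def grasshopper_alt (n : Int) : Int :=
  let G0 := List.replicate (n + 1).toNat (-1 : Int)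
  let G1 := PySem.List.pySetD G0 0 0
  let G2 := PySem.List.pySetD G1 1 1
  let G3 := PySem.List.pySetD G2 2 1
  let Z := (PySem.List.pyRange 3 (n + 1) 1).foldl (fun G i => PySem.List.pySetD G i 0) G3
  let P := (PySem.List.pyRange 0 (n + 1) 1).foldl (fun G j =>
      let v := PySem.List.pyGetD G j 0
      let Ga := if 3 ≤ j + 1 ∧ j + 1 ≤ n then
          PySem.List.pySetD G (j + 1) (PySem.List.pyGetD G (j + 1) 0 + v) else G
      let Gb := if 3 ≤ j + 2 ∧ j + 2 ≤ n then
          PySem.List.pySetD Ga (j + 2) (PySem.List.pyGetD Ga (j + 2) 0 + v) else Ga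
      if 1 ≤ j ∧ 3 * j ≤ n then
        PySem.List.pySetD Gb (3 * j) (PySem.List.pyGetD Gb (3 * j) 0 + v) else Gb) Z
  PySem.List.pyGetD P n 0

-- ===== PRECONDITION & SPEC =====
-- Python A raises IndexError for every n < 2 (G[0]=0 / G[1]=1 / G[2]=1 on a too-short list);
-- Pre_ admits exactly the inputs on which A returns.
def Pre_grasshopper (n : Int) : Prop := 2 ≤ n
instance (n : Int) : Decidable (Pre_grasshopper n) := by unfold Pre_grasshopper; infer_instance
def pvWitness_grasshopper : Int := (6)

def Spec_grasshopper (n : Int) (out : Int) : Prop := out = grasshopper_alt n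
instance (n : Int) (out : Int) : Decidable (Spec_grasshopper n out) := by unfold Spec_grasshopper; infer_instance

-- ===== CLAIM (what is proved, stated in full; the proofs are below) =====
def Claim_equal_grasshopper : Prop := ∀ (n : Int), Dom_grasshopper n → Pre_grasshopper n → Spec_grasshopper n (grasshopper n)

-- ===== LEMMAS AND PROOFS =====

-- the mathematical value both tables compute
def pvG (m : Nat) : Int :=
  if m = 0 then 0
  else if m ≤ 2 then 1
  else pvG (m - 1) + pvG (m - 2) + (if m % 3 = 0 then pvG (m / 3) else 0)
termination_by m
decreasing_by
  · omega
  · omega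
  · exact Nat.div_lt_self (by omega) (by omega)

theorem pvG_zero : pvG 0 = 0 := by unfold pvG; simp
theorem pvG_one : pvG 1 = 1 := by unfold pvG; simp
theorem pvG_two : pvG 2 = 1 := by unfold pvG; simp

theorem pvG_step {m : Nat} (h : 3 ≤ m) :
    pvG m = pvG (m - 1) + pvG (m - 2) + (if m % 3 = 0 then pvG (m / 3) else 0) := by
  conv_lhs => unfold pvG
  rw [if_neg (by omega), if_neg (by omega)]

theorem pvGetD_set (l : List Int) (i j : Nat) (v : Int) :
    (l.set i v).getD j 0 = if i = j ∧ i < l.length then v else l.getD j 0 := by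
  by_cases h : i = j
  · subst h
    by_cases hl : i < l.length
    · simp [List.getD, hl]
    · rw [if_neg (by omega), List.set_eq_of_length_le (by omega)]
  · simp [List.getD, List.getElem?_set_ne h, h]

-- the common initial table [0, 1, 1, -1, -1, …]
def pvBase (m : Nat) : List Int :=
  (((List.replicate (m + 1) (-1 : Int)).set 0 0).set 1 1).set 2 1

theorem pvBase_length (m : Nat) : (pvBase m).length = m + 1 := by
  simp [pvBase]

theorem pvBase_getD (m t : Nat) (h2 : 2 ≤ m) (ht : t ≤ m) :
    (pvBase m).getD t 0 = if t < 3 then pvG t else -1 := by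
  unfold pvBase
  rw [pvGetD_set, pvGetD_set, pvGetD_set]
  simp only [List.length_set, List.length_replicate]
  rcases Nat.lt_or_ge t 3 with h | h
  · interval_cases t <;> simp [pvG_zero, pvG_one, pvG_two] <;> omega
  · rw [if_neg (by omega), if_neg (by omega), if_neg (by omega), if_neg (by omega)]
    exact List.getD_replicate _ (by omega)

-- Nat-level restatement of A's loop body
def pvStepA (G : List Int) (i : Nat) : List Int :=
  let G' := G.set i (G.getD (i - 1) 0 + G.getD (i - 2) 0)
  if i % 3 = 0 then G'.set i (G'.getD i 0 + G'.getD (i / 3) 0) else G'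

-- Nat-level restatement of B's push-loop body
def pvStepB (m : Nat) (G : List Int) (j : Nat) : List Int :=
  let v := G.getD j 0
  let Ga := if 3 ≤ j + 1 ∧ j + 1 ≤ m then G.set (j + 1) (G.getD (j + 1) 0 + v) else G
  let Gb := if 3 ≤ j + 2 ∧ j + 2 ≤ m then Ga.set (j + 2) (Ga.getD (j + 2) 0 + v) else Ga
  if 1 ≤ j ∧ 3 * j ≤ m then Gb.set (3 * j) (Gb.getD (3 * j) 0 + v) else Gb

-- ---------- A side ----------

theorem stepA_spec (m i : Nat) (G : List Int) (hlen : G.length = m + 1)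
    (h3 : 3 ≤ i) (him : i ≤ m)
    (hG : ∀ t, t ≤ m → G.getD t 0 = if t < i then pvG t else -1) :
    (pvStepA G i).length = m + 1 ∧
      ∀ t, t ≤ m → (pvStepA G i).getD t 0 = if t < i + 1 then pvG t else -1 := by
  have hi1 : G.getD (i - 1) 0 = pvG (i - 1) := by
    rw [hG (i - 1) (by omega), if_pos (by omega)]
  have hi2 : G.getD (i - 2) 0 = pvG (i - 2) := by
    rw [hG (i - 2) (by omega), if_pos (by omega)]
  have hdiv : i / 3 < i := by omega
  have hdivm : i / 3 ≤ m := by omega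
  unfold pvStepA
  dsimp only []
  simp only [hi1, hi2]
  set G' := G.set i (pvG (i - 1) + pvG (i - 2)) with hG'
  have hlen' : G'.length = m + 1 := by rw [hG', List.length_set, hlen]
  have hget' : ∀ t, t ≤ m →
      G'.getD t 0 = if t = i then pvG (i - 1) + pvG (i - 2) else if t < i then pvG t else -1 := by
    intro t ht
    rw [hG', pvGetD_set, hlen]
    by_cases h' : i = t
    · rw [if_pos ⟨h', by omega⟩, if_pos h'.symm]
    · rw [if_neg (fun hh => h' hh.1), if_neg (fun hh => h' hh.symm), hG t ht]
  constructor
  · split <;> simp [hlen']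
  · intro t ht
    by_cases hmod : i % 3 = 0
    · rw [if_pos hmod]
      have d1 : G'.getD i 0 = pvG (i - 1) + pvG (i - 2) := by
        rw [hget' i him, if_pos rfl]
      have d2 : G'.getD (i / 3) 0 = pvG (i / 3) := by
        rw [hget' (i / 3) hdivm, if_neg (by omega), if_pos hdiv]
      rw [d1, d2, pvGetD_set, hlen']
      by_cases h' : i = t
      · rw [if_pos ⟨h', by omega⟩]
        subst h'
        rw [if_pos (by omega), pvG_step h3, if_pos hmod]
      · rw [if_neg (fun hh => h' hh.1), hget' t ht, if_neg (fun hh => h' hh.symm)]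
        by_cases h'' : t < i
        · rw [if_pos h'', if_pos (by omega)]
        · rw [if_neg h'', if_neg (by omega)]
    · rw [if_neg hmod, hget' t ht]
      by_cases h' : t = i
      · subst h'
        rw [if_pos rfl, if_pos (by omega), pvG_step h3, if_neg hmod, add_zero]
      · rw [if_neg h']
        by_cases h'' : t < i
        · rw [if_pos h'', if_pos (by omega)]
        · rw [if_neg h'', if_neg (by omega)]

theorem foldA_spec (m : Nat) (h2 : 2 ≤ m) :
    ∀ c, c ≤ m - 2 →
      (((List.range c).foldl (fun G k => pvStepA G (3 + k)) (pvBase m)).length = m + 1 ∧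
       ∀ t, t ≤ m →
        ((List.range c).foldl (fun G k => pvStepA G (3 + k)) (pvBase m)).getD t 0
          = if t < 3 + c then pvG t else -1) := by
  intro c
  induction c with
  | zero =>
    intro _
    exact ⟨pvBase_length m, fun t ht => pvBase_getD m t h2 ht⟩
  | succ c ih =>
    intro hc
    obtain ⟨ihl, ihv⟩ := ih (by omega)
    rw [List.range_succ, List.foldl_append]
    simp only [List.foldl_cons, List.foldl_nil]
    have := stepA_spec m (3 + c) _ ihl (by omega) (by omega) ihv
    refine ⟨this.1, fun t ht => ?_⟩
    rw [this.2 t ht]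
    rfl

theorem pvSet0 (xs : List Int) (v : Int) : PySem.List.pySetD xs 0 v = xs.set 0 v :=
  PySem.List.pySetD_of_nonneg xs v (by norm_num)
theorem pvSet1 (xs : List Int) (v : Int) : PySem.List.pySetD xs 1 v = xs.set 1 v :=
  PySem.List.pySetD_of_nonneg xs v (by norm_num)
theorem pvSet2 (xs : List Int) (v : Int) : PySem.List.pySetD xs 2 v = xs.set 2 v :=
  PySem.List.pySetD_of_nonneg xs v (by norm_num)

theorem pvTruncdiv3 (m : Nat) :
    PySem.Int.truncdiv ((m : Nat) : Int) 3 = ((m / 3 : Nat) : Int) := by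
  simp [PySem.Int.truncdiv]

theorem pvPyGetD_nonneg (xs : List Int) (i : Int) (h : 0 ≤ i) :
    PySem.List.pyGetD xs i 0 = xs.getD i.toNat 0 := by
  rw [show i = ((i.toNat : Nat) : Int) from by omega, PySem.List.pyGetD_natCast, Int.toNat_natCast]

theorem bridgeA (n : Int) (h : 2 ≤ n) :
    grasshopper n =
      ((List.range (n.toNat - 2)).foldl (fun G k => pvStepA G (3 + k))
        (pvBase n.toNat)).getD n.toNat 0 := by
  unfold grasshopper
  dsimp only []
  have hbase :
      PySem.List.pySetD (PySem.List.pySetD (PySem.List.pySetD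
        (List.replicate (n + 1).toNat (-1 : Int)) 0 0) 1 1) 2 1 = pvBase n.toNat := by
    rw [pvSet0, pvSet1, pvSet2]
    unfold pvBase
    rw [show (n + 1).toNat = n.toNat + 1 from by omega]
  rw [pvPyGetD_nonneg _ _ (by omega), hbase, PySem.List.pyRange_one,
      show (n + 1 - 3).toNat = n.toNat - 2 from by omega, List.foldl_map]
  congr 1
  congr 1
  funext G k
  dsimp only []
  rw [show (3 : Int) + (k : Int) = ((3 + k : Nat) : Int) from by omega]
  rw [show ((3 + k : Nat) : Int) - 1 = ((3 + k - 1 : Nat) : Int) from by omega]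
  rw [show ((3 + k : Nat) : Int) - 2 = ((3 + k - 2 : Nat) : Int) from by omega]
  rw [pvTruncdiv3 (3 + k)]
  rw [show PySem.Int.mod ((3 + k : Nat) : Int) 3 = (((3 + k) % 3 : Nat) : Int) from by
    exact_mod_cast PySem.Int.mod_natCast (3 + k) 3]
  simp only [PySem.List.pySetD_natCast, PySem.List.pyGetD_natCast, Int.natCast_eq_zero]
  unfold pvStepA
  dsimp only []

theorem grasshopper_eq_pvG (n : Int) (h : 2 ≤ n) : grasshopper n = pvG n.toNat := by
  rw [bridgeA n h]
  obtain ⟨-, hv⟩ := foldA_spec n.toNat (by omega) (n.toNat - 2) le_rfl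
  rw [hv n.toNat le_rfl, if_pos (by omega)]

-- ---------- B side ----------

-- the value of table entry t after the pushes from j = 0 … c-1
def pvVal (t c : Nat) : Int :=
  if t < 3 then pvG t
  else (if t - 1 < c then pvG (t - 1) else 0) + (if t - 2 < c then pvG (t - 2) else 0)
       + (if t % 3 = 0 ∧ t / 3 < c then pvG (t / 3) else 0)

theorem pvVal_final (t c : Nat) (h : t ≤ c) : pvVal t c = pvG t := by
  unfold pvVal
  by_cases h3 : t < 3
  · rw [if_pos h3]
  · rw [if_neg h3, if_pos (by omega), if_pos (by omega), pvG_step (m := t) (by omega)]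
    by_cases hm : t % 3 = 0
    · rw [if_pos ⟨hm, by omega⟩, if_pos hm]
    · rw [if_neg (fun hh => hm hh.1), if_neg hm]

theorem stepB_spec (m c : Nat) (G : List Int) (hlen : G.length = m + 1) (hc : c ≤ m)
    (hG : ∀ t, t ≤ m → G.getD t 0 = pvVal t c) :
    (pvStepB m G c).length = m + 1 ∧
      ∀ t, t ≤ m → (pvStepB m G c).getD t 0 = pvVal t (c + 1) := by
  have hv : G.getD c 0 = pvG c := by rw [hG c hc, pvVal_final c c le_rfl]
  unfold pvStepB
  dsimp only []
  simp only [hv]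
  set Ga := if 3 ≤ c + 1 ∧ c + 1 ≤ m then G.set (c + 1) (G.getD (c + 1) 0 + pvG c) else G with hGa
  set Gb := if 3 ≤ c + 2 ∧ c + 2 ≤ m then Ga.set (c + 2) (Ga.getD (c + 2) 0 + pvG c) else Ga with hGb
  have hGalen : Ga.length = m + 1 := by rw [hGa]; split <;> simp [hlen]
  have hGblen : Gb.length = m + 1 := by rw [hGb]; split <;> simp [hGalen]
  have hGaget : ∀ t, Ga.getD t 0
      = G.getD t 0 + (if t = c + 1 ∧ 3 ≤ c + 1 ∧ c + 1 ≤ m then pvG c else 0) := by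
    intro t
    rw [hGa]
    by_cases hg : 3 ≤ c + 1 ∧ c + 1 ≤ m
    · rw [if_pos hg, pvGetD_set, hlen]
      by_cases h' : c + 1 = t
      · rw [if_pos ⟨h', by omega⟩, if_pos ⟨h'.symm, hg⟩]
        subst h'
        rfl
      · rw [if_neg (fun hh => h' hh.1), if_neg (fun hh => h' hh.1.symm), add_zero]
    · rw [if_neg hg, if_neg (fun hh => hg hh.2), add_zero]
  have hGbget : ∀ t, Gb.getD t 0
      = Ga.getD t 0 + (if t = c + 2 ∧ 3 ≤ c + 2 ∧ c + 2 ≤ m then pvG c else 0) := by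
    intro t
    rw [hGb]
    by_cases hg : 3 ≤ c + 2 ∧ c + 2 ≤ m
    · rw [if_pos hg, pvGetD_set, hGalen]
      by_cases h' : c + 2 = t
      · rw [if_pos ⟨h', by omega⟩, if_pos ⟨h'.symm, hg⟩]
        subst h'
        rfl
      · rw [if_neg (fun hh => h' hh.1), if_neg (fun hh => h' hh.1.symm), add_zero]
    · rw [if_neg hg, if_neg (fun hh => hg hh.2), add_zero]
  have hFget : ∀ t, (if 1 ≤ c ∧ 3 * c ≤ m then Gb.set (3 * c) (Gb.getD (3 * c) 0 + pvG c) else Gb).getD t 0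
      = Gb.getD t 0 + (if t = 3 * c ∧ 1 ≤ c ∧ 3 * c ≤ m then pvG c else 0) := by
    intro t
    by_cases hg : 1 ≤ c ∧ 3 * c ≤ m
    · rw [if_pos hg, pvGetD_set, hGblen]
      by_cases h' : 3 * c = t
      · rw [if_pos ⟨h', by omega⟩, if_pos ⟨h'.symm, hg⟩]
        subst h'
        rfl
      · rw [if_neg (fun hh => h' hh.1), if_neg (fun hh => h' hh.1.symm), add_zero]
    · rw [if_neg hg, if_neg (fun hh => hg hh.2), add_zero]
  constructor
  · split <;> simp [hGblen]
  · intro t ht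
    rw [hFget t, hGbget t, hGaget t, hG t ht]
    unfold pvVal
    by_cases h3 : t < 3
    · rw [if_pos h3, if_pos h3,
          if_neg (by omega), if_neg (by omega), if_neg (by omega)]
      ring
    · rw [if_neg h3, if_neg h3]
      have e1 : (if t - 1 < c + 1 then pvG (t - 1) else 0)
          = (if t - 1 < c then pvG (t - 1) else 0)
            + (if t = c + 1 ∧ 3 ≤ c + 1 ∧ c + 1 ≤ m then pvG c else 0) := by
        by_cases h' : t = c + 1
        · subst h'
          rw [if_pos (show c + 1 - 1 < c + 1 from by omega),
              if_neg (show ¬(c + 1 - 1 < c) from by omega),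
              if_pos (show c + 1 = c + 1 ∧ 3 ≤ c + 1 ∧ c + 1 ≤ m from ⟨rfl, by omega, by omega⟩),
              show c + 1 - 1 = c from by omega]
          ring
        · rw [if_neg (show ¬(t = c + 1 ∧ 3 ≤ c + 1 ∧ c + 1 ≤ m) from fun hh => h' hh.1), add_zero]
          simp only [show (t - 1 < c + 1) ↔ (t - 1 < c) from by omega]
      have e2 : (if t - 2 < c + 1 then pvG (t - 2) else 0)
          = (if t - 2 < c then pvG (t - 2) else 0)
            + (if t = c + 2 ∧ 3 ≤ c + 2 ∧ c + 2 ≤ m then pvG c else 0) := by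
        by_cases h' : t = c + 2
        · subst h'
          rw [if_pos (show c + 2 - 2 < c + 1 from by omega),
              if_neg (show ¬(c + 2 - 2 < c) from by omega),
              if_pos (show c + 2 = c + 2 ∧ 3 ≤ c + 2 ∧ c + 2 ≤ m from ⟨rfl, by omega, by omega⟩),
              show c + 2 - 2 = c from by omega]
          ring
        · rw [if_neg (show ¬(t = c + 2 ∧ 3 ≤ c + 2 ∧ c + 2 ≤ m) from fun hh => h' hh.1), add_zero]
          simp only [show (t - 2 < c + 1) ↔ (t - 2 < c) from by omega]
      have e3 : (if t % 3 = 0 ∧ t / 3 < c + 1 then pvG (t / 3) else 0)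
          = (if t % 3 = 0 ∧ t / 3 < c then pvG (t / 3) else 0)
            + (if t = 3 * c ∧ 1 ≤ c ∧ 3 * c ≤ m then pvG c else 0) := by
        by_cases h' : t = 3 * c ∧ 1 ≤ c
        · obtain ⟨ha, hb⟩ := h'
          subst ha
          rw [if_pos (show 3 * c % 3 = 0 ∧ 3 * c / 3 < c + 1 from by omega),
              if_neg (show ¬(3 * c % 3 = 0 ∧ 3 * c / 3 < c) from by omega),
              if_pos (show 3 * c = 3 * c ∧ 1 ≤ c ∧ 3 * c ≤ m from ⟨rfl, hb, ht⟩),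
              show 3 * c / 3 = c from by omega]
          ring
        · rw [if_neg (show ¬(t = 3 * c ∧ 1 ≤ c ∧ 3 * c ≤ m) from fun hh => h' ⟨hh.1, hh.2.1⟩),
              add_zero]
          simp only [show (t % 3 = 0 ∧ t / 3 < c + 1) ↔ (t % 3 = 0 ∧ t / 3 < c) from by omega]
      rw [e1, e2, e3]
      ring

theorem foldZ_spec (m : Nat) (h2 : 2 ≤ m) :
    (((List.range (m - 2)).foldl (fun (G : List Int) k => G.set (3 + k) 0) (pvBase m)).length = m + 1 ∧
     ∀ t, t ≤ m →
      ((List.range (m - 2)).foldl (fun (G : List Int) k => G.set (3 + k) 0) (pvBase m)).getD t 0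
        = pvVal t 0) := by
  suffices h : ∀ c, c ≤ m - 2 →
      (((List.range c).foldl (fun (G : List Int) k => G.set (3 + k) 0) (pvBase m)).length = m + 1 ∧
       ∀ t, t ≤ m →
        ((List.range c).foldl (fun (G : List Int) k => G.set (3 + k) 0) (pvBase m)).getD t 0
          = if t < 3 + c then (if t < 3 then pvG t else 0) else -1) by
    obtain ⟨hl, hv⟩ := h (m - 2) le_rfl
    refine ⟨hl, fun t ht => ?_⟩
    rw [hv t ht]
    unfold pvVal
    by_cases h3 : t < 3
    · rw [if_pos (by omega), if_pos h3, if_pos h3]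
    · rw [if_pos (by omega), if_neg h3, if_neg h3,
          if_neg (by omega), if_neg (by omega), if_neg (by omega)]
      ring
  intro c
  induction c with
  | zero =>
    intro _
    refine ⟨pvBase_length m, fun t ht => ?_⟩
    rw [List.range_zero, List.foldl_nil, pvBase_getD m t h2 ht]
    by_cases h3 : t < 3
    · rw [if_pos h3, if_pos (show t < 3 + 0 from by omega), if_pos h3]
    · rw [if_neg h3, if_neg (show ¬(t < 3 + 0) from by omega)]
  | succ c ih =>
    intro hc
    obtain ⟨ihl, ihv⟩ := ih (by omega)
    rw [List.range_succ, List.foldl_append]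
    simp only [List.foldl_cons, List.foldl_nil]
    refine ⟨by simp [ihl], fun t ht => ?_⟩
    rw [pvGetD_set, ihl]
    by_cases h' : 3 + c = t
    · rw [if_pos (show (3 + c = t ∧ 3 + c < m + 1) from ⟨h', by omega⟩)]
      subst h'
      rw [if_pos (show 3 + c < 3 + (c + 1) from by omega),
          if_neg (show ¬(3 + c < 3) from by omega)]
    · rw [if_neg (show ¬(3 + c = t ∧ 3 + c < m + 1) from fun hh => h' hh.1), ihv t ht]
      by_cases h'' : t < 3 + c
      · rw [if_pos h'', if_pos (show t < 3 + (c + 1) from by omega)]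
      · rw [if_neg h'', if_neg (show ¬(t < 3 + (c + 1)) from by omega)]

theorem foldB_spec (m : Nat) (G0 : List Int) (hlen : G0.length = m + 1)
    (hG0 : ∀ t, t ≤ m → G0.getD t 0 = pvVal t 0) :
    ∀ c, c ≤ m + 1 →
      (((List.range c).foldl (pvStepB m) G0).length = m + 1 ∧
       ∀ t, t ≤ m → ((List.range c).foldl (pvStepB m) G0).getD t 0 = pvVal t c) := by
  intro c
  induction c with
  | zero => intro _; exact ⟨hlen, hG0⟩
  | succ c ih =>
    intro hc
    obtain ⟨ihl, ihv⟩ := ih (by omega)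
    rw [List.range_succ, List.foldl_append]
    simp only [List.foldl_cons, List.foldl_nil]
    exact stepB_spec m c _ ihl (by omega) ihv

theorem bridgeB (n : Int) (h : 2 ≤ n) :
    grasshopper_alt n =
      ((List.range (n.toNat + 1)).foldl (pvStepB n.toNat)
        ((List.range (n.toNat - 2)).foldl (fun (G : List Int) k => G.set (3 + k) 0)
          (pvBase n.toNat))).getD n.toNat 0 := by
  unfold grasshopper_alt
  dsimp only []
  have hbase :
      PySem.List.pySetD (PySem.List.pySetD (PySem.List.pySetD
        (List.replicate (n + 1).toNat (-1 : Int)) 0 0) 1 1) 2 1 = pvBase n.toNat := by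
    rw [pvSet0, pvSet1, pvSet2]
    unfold pvBase
    rw [show (n + 1).toNat = n.toNat + 1 from by omega]
  rw [pvPyGetD_nonneg _ _ (by omega), hbase, PySem.List.pyRange_one, PySem.List.pyRange_one,
      show (n + 1 - 3).toNat = n.toNat - 2 from by omega,
      show (n + 1 - 0).toNat = n.toNat + 1 from by omega,
      List.foldl_map, List.foldl_map]
  congr 1
  congr 1
  · funext G k
    dsimp only []
    rw [show (0 : Int) + (k : Int) = ((k : Nat) : Int) from by omega]
    rw [show ((k : Nat) : Int) + 1 = ((k + 1 : Nat) : Int) from by omega]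
    rw [show ((k : Nat) : Int) + 2 = ((k + 2 : Nat) : Int) from by omega]
    rw [show (3 : Int) * ((k : Nat) : Int) = ((3 * k : Nat) : Int) from by omega]
    have g1 : (3 ≤ ((k + 1 : Nat) : Int) ∧ ((k + 1 : Nat) : Int) ≤ n)
        = (3 ≤ k + 1 ∧ k + 1 ≤ n.toNat) := by
      apply propext; omega
    have g2 : (3 ≤ ((k + 2 : Nat) : Int) ∧ ((k + 2 : Nat) : Int) ≤ n)
        = (3 ≤ k + 2 ∧ k + 2 ≤ n.toNat) := by
      apply propext; omega
    have g3 : (1 ≤ ((k : Nat) : Int) ∧ ((3 * k : Nat) : Int) ≤ n)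
        = (1 ≤ k ∧ 3 * k ≤ n.toNat) := by
      apply propext; omega
    simp only [g1, g2, g3, PySem.List.pySetD_natCast, PySem.List.pyGetD_natCast]
    unfold pvStepB
    dsimp only []
  · congr 1
    funext G k
    dsimp only []
    rw [show (3 : Int) + (k : Int) = ((3 + k : Nat) : Int) from by omega,
        PySem.List.pySetD_natCast]

theorem grasshopper_alt_eq_pvG (n : Int) (h : 2 ≤ n) : grasshopper_alt n = pvG n.toNat := by
  rw [bridgeB n h]
  obtain ⟨hzl, hzv⟩ := foldZ_spec n.toNat (by omega)
  obtain ⟨-, hv⟩ := foldB_spec n.toNat _ hzl hzv (n.toNat + 1) le_rfl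
  rw [hv n.toNat le_rfl, pvVal_final n.toNat (n.toNat + 1) (by omega)]

-- ===== VERDICT (by name: the statement is the Claim_ definition above) =====
theorem grasshopper_spec : Claim_equal_grasshopper := by
  intro n _ hpre
  unfold Spec_grasshopper
  rw [grasshopper_eq_pvG n hpre, grasshopper_alt_eq_pvG n hpre]
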